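-- pv_equiv track=rewrite | github.com/br3nr/aoc23 | 13/star_2.py | get_contiguous_symmetry
-- ===== SOURCE A (Python) =====
-- def check_mask_symmetry(mask):
--     for i in range(len(mask) - 1, -1, -1):
--         sub_mask = mask[: i + 1]
--         if sub_mask == sub_mask[::-1] and len(sub_mask) != 1 and len(sub_mask) % 2 == 0:
--             return True
--     return False
--
-- def get_mask(pattern, map):
--     mask = []
--     for p in pattern:
--         mask.append(map["".join(p)])
--     return mask
--
-- def create_map(pattern):
--     map = {}
--     for p in pattern:
--         p = "".join(p)
--         map[p] = map.get(p, len(map))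
--     return map
--
-- def get_contiguous_symmetry(pattern):
--     map = create_map(pattern)
--     mask = get_mask(pattern, map)
--     sym = check_mask_symmetry(mask)
--
--     if not sym:
--         mask = mask[::-1]
--     for i in range(len(mask) - 1, -1, -1):
--         sub_mask = mask[: i + 1]
--         if sub_mask == sub_mask[::-1] and len(sub_mask) != 1 and len(sub_mask) % 2 == 0:
--             return sub_mask
--
--     return []
-- ===== SOURCE B (Python) =====
-- def _edge(seq):
--     # longest even palindromic prefix, by expanding around each even center:
--     # prefix of length 2*c is a palindrome iff the palindrome centred between
--     # indices c-1 and c reaches the left edge (radius == c)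
--     best = 0
--     for c in range(1, len(seq) // 2 + 1):
--         r = 0
--         while r < c and seq[c - 1 - r] == seq[c + r]:
--             r += 1
--         if r == c:
--             best = 2 * c
--     return best
--
-- def get_contiguous_symmetry(pattern):
--     k = _edge(pattern)
--     seq = pattern
--     if k == 0:
--         seq = pattern[::-1]
--         k = _edge(seq)
--     ids = {}
--     for p in pattern:
--         ids.setdefault(p, len(ids))
--     return [ids[p] for p in seq[:k]]
-- ===== Notes on version B (the rewrite author's own statement) =====
-- stated objective: faster
-- what changed: B finds the longest even palindromic prefix by expanding around each even centre on the pattern strings themselves (the prefix of length 2c is a palindrome iff the palindrome centred between c-1 and c reaches the left edge) instead of A's slice-and-reverse equality test of every even prefix of a precomputed id mask, and applies the first-occurrence ids only to the winning prefix at the end.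
import Mathlib
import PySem

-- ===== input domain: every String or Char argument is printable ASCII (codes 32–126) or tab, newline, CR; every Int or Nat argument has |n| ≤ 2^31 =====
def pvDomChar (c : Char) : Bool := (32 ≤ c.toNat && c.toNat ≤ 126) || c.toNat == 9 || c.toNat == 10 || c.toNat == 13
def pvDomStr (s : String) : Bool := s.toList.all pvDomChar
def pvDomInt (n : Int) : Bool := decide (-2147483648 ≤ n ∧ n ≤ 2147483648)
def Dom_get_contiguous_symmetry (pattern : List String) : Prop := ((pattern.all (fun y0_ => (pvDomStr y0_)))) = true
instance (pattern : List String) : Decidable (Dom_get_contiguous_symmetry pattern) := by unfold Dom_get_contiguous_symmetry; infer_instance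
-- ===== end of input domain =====

-- B replaces A's slice-and-reverse scan over every even prefix by centre expansion on the pattern
-- strings themselves (the prefix of length 2c is a palindrome iff the palindrome centred between
-- c-1 and c reaches the left edge), with the first-occurrence ids applied only to the winning
-- prefix at the end; objective: alternative.

-- ===== PORT A =====
-- create_map: map[p] = map.get(p, len(map))   ("".join(p) on a str p is p itself)
def aCreateMap (pattern : List String) : PySem.Dict String Int :=
  pattern.foldl (fun m p => m.insert p (m.getD p (m.size : Int))) PySem.Dict.empty

-- get_mask: mask.append(map["".join(p)]); every key is present (map was built from the same pattern),
-- so Python's map[p] never raises and getD with any default is exact.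
def aGetMask (pattern : List String) (m : PySem.Dict String Int) : List Int :=
  pattern.foldl (fun acc p => acc ++ [m.getD p 0]) []

-- sub == sub[::-1] and len(sub) != 1 and len(sub) % 2 == 0
def aCond (sub : List Int) : Bool :=
  decide (sub = sub.reverse) && (sub.length != 1) && (sub.length % 2 == 0)

-- check_mask_symmetry's loop: i = len(mask)-1 .. 0, argument j is i+1; mask[:i+1] is take (i+1) (exact: i+1 ≥ 0)
def aCheckLoop (mask : List Int) : Nat → Bool
  | 0 => false
  | j + 1 => if aCond (mask.take (j + 1)) then true else aCheckLoop mask j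

-- the identical loop in get_contiguous_symmetry, returning sub_mask
def aFindLoop (mask : List Int) : Nat → Option (List Int)
  | 0 => none
  | j + 1 =>
    if aCond (mask.take (j + 1)) then some (mask.take (j + 1)) else aFindLoop mask j

def get_contiguous_symmetry (pattern : List String) : List Int :=
  let map := aCreateMap pattern
  let mask := aGetMask pattern map
  let sym := aCheckLoop mask mask.length
  let mask2 := if sym then mask else mask.reverse  -- mask[::-1]
  (aFindLoop mask2 mask2.length).getD []           -- falls through to `return []`

-- ===== PORT B =====
-- while r < c and seq[c-1-r] == seq[c+r]: r += 1   (indices are always in range: r < c ≤ len//2)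
def bWhile (seq : List String) (c : Int) (r : Int) : Int :=
  if h : r < c ∧ PySem.List.pyGetD seq (c - 1 - r) "" = PySem.List.pyGetD seq (c + r) "" then
    bWhile seq c (r + 1)
  else r
termination_by (c - r).toNat
decreasing_by omega

-- for c in range(1, len(seq)//2 + 1): … if r == c: best = 2*c
def bEdge (seq : List String) : Int :=
  (PySem.List.pyRange 1 (PySem.Int.floordiv (seq.length : Int) 2 + 1) 1).foldl
    (fun best c => if bWhile seq c 0 = c then 2 * c else best) 0

-- ids.setdefault(p, len(ids))
def bIds (pattern : List String) : PySem.Dict String Int :=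
  pattern.foldl (fun d p => d.setdefault p (d.size : Int)) PySem.Dict.empty

-- [ids[p] for p in seq[:k]]: every p of seq[:k] is a member of pattern, hence a key of ids,
-- so Python's ids[p] never raises and getD with any default is exact.
def get_contiguous_symmetry_alt (pattern : List String) : List Int :=
  let k := bEdge pattern
  let sk : List String × Int :=
    if k = 0 then (pattern.reverse, bEdge pattern.reverse) else (pattern, k)
  let ids := bIds pattern
  (PySem.List.slice sk.1 none (some sk.2)).map (fun p => ids.getD p 0)

-- ===== PRECONDITION & SPEC =====
def Spec_get_contiguous_symmetry (pattern : List String) (out : List Int) : Prop := out = get_contiguous_symmetry_alt pattern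
instance (pattern : List String) (out : List Int) : Decidable (Spec_get_contiguous_symmetry pattern out) := by unfold Spec_get_contiguous_symmetry; infer_instance

-- ===== CLAIM (what is proved, stated in full; the proofs are below) =====
def Claim_equal_get_contiguous_symmetry : Prop := ∀ (pattern : List String), Dom_get_contiguous_symmetry pattern → Spec_get_contiguous_symmetry pattern (get_contiguous_symmetry pattern)

-- ===== LEMMAS AND PROOFS =====

-- largest even k ≤ j with (take k l) palindromic (0 if none): the reference value both scans compute
def recBest {α : Type} [DecidableEq α] (m : List α) : Nat → Nat
  | 0 => 0
  | j + 1 =>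
    if (j + 1) % 2 = 0 ∧ m.take (j + 1) = (m.take (j + 1)).reverse then j + 1
    else recBest m j

theorem recBest_succ {α : Type} [DecidableEq α] (m : List α) (j : Nat) :
    recBest m (j + 1) =
      if (j + 1) % 2 = 0 ∧ m.take (j + 1) = (m.take (j + 1)).reverse then j + 1
      else recBest m j := rfl

-- ---- A-side characterisation ----
theorem cond_bridge (m : List Int) (j : Nat) (hj : j + 1 ≤ m.length) :
    aCond (m.take (j + 1))
      = decide ((j + 1) % 2 = 0 ∧ m.take (j + 1) = (m.take (j + 1)).reverse) := by
  unfold aCond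
  have hlen : (m.take (j + 1)).length = j + 1 := by
    simp [List.length_take, Nat.min_eq_left hj]
  rw [hlen]
  by_cases hp : m.take (j + 1) = (m.take (j + 1)).reverse
  · have hd := decide_eq_true hp
    by_cases he : (j + 1) % 2 = 0
    · simp [hd, he]; omega
    · simp [hd, he]
  · simp [hp]

theorem findLoop_eq (m : List Int) : ∀ j, j ≤ m.length →
    aFindLoop m j = if recBest m j = 0 then none else some (m.take (recBest m j)) := by
  intro j
  induction j with
  | zero => intro _; rfl
  | succ j ih =>
    intro hj
    simp only [aFindLoop, recBest, cond_bridge m j hj, decide_eq_true_eq]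
    by_cases hc : (j + 1) % 2 = 0 ∧ m.take (j + 1) = (m.take (j + 1)).reverse
    · rw [if_pos hc, if_pos hc, if_neg (by omega : ¬ j + 1 = 0)]
    · rw [if_neg hc, if_neg hc]
      exact ih (by omega)

theorem checkLoop_eq (m : List Int) : ∀ j, aCheckLoop m j = (aFindLoop m j).isSome := by
  intro j
  induction j with
  | zero => rfl
  | succ j ih =>
    simp only [aCheckLoop, aFindLoop]
    split_ifs
    · simp
    · exact ih

-- ---- the id maps: A's unconditional re-insert is B's setdefault, and the map is injective ----
theorem step_setdefault (d : PySem.Dict String Int) (p : String) (hnd : d.keys.Nodup) :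
    d.insert p (d.getD p (d.size : Int)) = d.setdefault p (d.size : Int) := by
  cases hc : d.contains p with
  | false =>
    rw [PySem.Dict.setdefault_of_not_contains d _ hc,
        PySem.Dict.getD_of_not_contains d _ hc]
  | true =>
    rw [PySem.Dict.setdefault_of_contains d _ hc]
    obtain ⟨v, hv⟩ : ∃ v, d.get? p = some v := by
      have h := PySem.Dict.contains_eq_isSome_get? d p
      rw [hc] at h
      exact Option.isSome_iff_exists.mp h.symm
    rw [PySem.Dict.getD_of_get?_eq_some d _ hv]
    apply PySem.Dict.ext
    rw [PySem.Dict.items_insert_of_contains d v hc]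
    conv_rhs => rw [← List.map_id d.items]
    apply List.map_congr_left
    intro q hq
    obtain ⟨q1, q2⟩ := q
    by_cases hqp : q1 = p
    · subst hqp
      have hgq := PySem.Dict.get?_of_mem_items d hq hnd
      rw [hv] at hgq
      have hq2 : q2 = v := (Option.some_inj.mp hgq).symm
      simp [hq2]
    · simp [hqp]

-- invariant carried through the id-building fold
def IdsInv (d : PySem.Dict String Int) : Prop :=
  d.keys.Nodup ∧
  (∀ p q vp vq, d.get? p = some vp → d.get? q = some vq → vp = vq → p = q) ∧
  (∀ p v, d.get? p = some v → 0 ≤ v ∧ v < (d.size : Int))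

theorem idsInv_empty : IdsInv (PySem.Dict.empty : PySem.Dict String Int) := by
  refine ⟨PySem.Dict.nodup_keys_empty, ?_, ?_⟩ <;> intro p <;> intros <;>
    simp_all [PySem.Dict.get?_empty]

theorem idsInv_step (d : PySem.Dict String Int) (p : String) (h : IdsInv d) :
    IdsInv (d.setdefault p (d.size : Int)) := by
  obtain ⟨hnd, hinj, hbnd⟩ := h
  cases hc : d.contains p with
  | true => rw [PySem.Dict.setdefault_of_contains d _ hc]; exact ⟨hnd, hinj, hbnd⟩
  | false =>
    rw [PySem.Dict.setdefault_of_not_contains d _ hc]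
    have hget : d.get? p = none := by
      have h := PySem.Dict.contains_eq_isSome_get? d p
      rw [hc] at h
      exact Option.eq_none_iff_forall_ne_some.mpr (fun v hv => by simp [hv] at h)
    have hsize : (d.insert p (d.size : Int)).size = d.size + 1 := by
      rw [PySem.Dict.size_insert]
      simp [hc]
    refine ⟨PySem.Dict.nodup_keys_insert d p _ hnd, ?_, ?_⟩
    · intro q r vq vr hq hr hqr
      rw [PySem.Dict.get?_insert] at hq hr
      split_ifs at hq hr with h1 h2 h2
      · rw [h1, h2]
      · exfalso
        have h3 := (hbnd r vr hr).2
        have h4 := Option.some_inj.mp hq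
        omega
      · exfalso
        have h3 := (hbnd q vq hq).2
        have h4 := Option.some_inj.mp hr
        omega
      · exact hinj q r vq vr hq hr hqr
    · intro q v hq
      rw [PySem.Dict.get?_insert] at hq
      rw [hsize]
      split_ifs at hq with h1
      · rw [← Option.some_inj.mp hq]; push_cast; omega
      · have := hbnd q v hq; push_cast; omega

theorem idsInv_fold (l : List String) : ∀ d, IdsInv d →
    IdsInv (l.foldl (fun d p => d.setdefault p (d.size : Int)) d) := by
  induction l with
  | nil => intro d h; exact h
  | cons p t ih => intro d h; exact ih _ (idsInv_step d p h)

theorem ids_eq_createMap (pattern : List String) :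
    aCreateMap pattern = bIds pattern := by
  unfold aCreateMap bIds
  suffices h : ∀ d : PySem.Dict String Int, IdsInv d →
      pattern.foldl (fun m p => m.insert p (m.getD p (m.size : Int))) d
        = pattern.foldl (fun d p => d.setdefault p (d.size : Int)) d from
    h PySem.Dict.empty idsInv_empty
  induction pattern with
  | nil => intro d _; rfl
  | cons p t ih =>
    intro d h
    simp only [List.foldl_cons]
    rw [step_setdefault d p h.1]
    exact ih _ (idsInv_step d p h)

-- once present, the id of a key never changes
theorem ids_mono (l : List String) : ∀ (d : PySem.Dict String Int) (p : String) (v : Int),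
    d.get? p = some v →
    (l.foldl (fun d p => d.setdefault p (d.size : Int)) d).get? p = some v := by
  induction l with
  | nil => intro d p v h; simpa using h
  | cons q t ih =>
    intro d p v h
    simp only [List.foldl_cons]
    apply ih
    by_cases hpq : p = q
    · subst hpq
      rw [PySem.Dict.get?_setdefault_self, h]
      rfl
    · rw [PySem.Dict.get?_setdefault_of_ne _ _ hpq, h]

theorem ids_contains (l : List String) : ∀ (d : PySem.Dict String Int) (p : String),
    p ∈ l → ((l.foldl (fun d p => d.setdefault p (d.size : Int)) d).get? p).isSome := by
  induction l with
  | nil => intro d p h; simp at h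
  | cons q t ih =>
    intro d p hp
    simp only [List.foldl_cons]
    rcases List.mem_cons.mp hp with h | h
    · subst h
      rcases hv : (d.setdefault p (d.size : Int)).get? p with _ | v
      · rw [PySem.Dict.get?_setdefault_self] at hv; simp at hv
      · rw [ids_mono t _ p v hv]; rfl
    · exact ih _ p h

-- the finished id map is injective on the members of pattern
theorem ids_injOn (pattern : List String) (p q : String)
    (hp : p ∈ pattern) (hq : q ∈ pattern)
    (h : (bIds pattern).getD p 0 = (bIds pattern).getD q 0) : p = q := by
  have hinv := idsInv_fold pattern PySem.Dict.empty idsInv_empty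
  obtain ⟨vp, hvp⟩ := Option.isSome_iff_exists.mp (ids_contains pattern PySem.Dict.empty p hp)
  obtain ⟨vq, hvq⟩ := Option.isSome_iff_exists.mp (ids_contains pattern PySem.Dict.empty q hq)
  have hdp : (bIds pattern).getD p 0 = vp := PySem.Dict.getD_of_get?_eq_some _ _ hvp
  have hdq : (bIds pattern).getD q 0 = vq := PySem.Dict.getD_of_get?_eq_some _ _ hvq
  exact hinv.2.1 p q vp vq hvp hvq (by rw [← hdp, ← hdq, h])

-- mask = pattern mapped through the id map
theorem mask_eq_map (pattern : List String) :
    aGetMask pattern (aCreateMap pattern) = pattern.map (fun p => (bIds pattern).getD p 0) := by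
  unfold aGetMask
  rw [PySem.List.foldl_append_singleton_eq_map, ids_eq_createMap]
  simp

-- an injective-on-members map reflects list equality
theorem map_inj_on {α β : Type} (f : α → β) (P : α → Prop)
    (hf : ∀ a b, P a → P b → f a = f b → a = b) :
    ∀ (l1 l2 : List α), (∀ x ∈ l1, P x) → (∀ x ∈ l2, P x) →
      l1.map f = l2.map f → l1 = l2 := by
  intro l1
  induction l1 with
  | nil => intro l2 _ _ h; cases l2 <;> simp_all
  | cons a t ih =>
    intro l2 h1 h2 h
    cases l2 with
    | nil => simp at h
    | cons b t2 =>
      simp only [List.map_cons, List.cons.injEq] at h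
      have hab := hf a b (h1 a (by simp)) (h2 b (by simp)) h.1
      rw [hab, ih t2 (fun x hx => h1 x (by simp [hx])) (fun x hx => h2 x (by simp [hx])) h.2]

-- palindromicity of a prefix transfers between pattern and mask
theorem pal_transfer (pattern : List String) (s : List String) (k : Nat)
    (hsub : ∀ x ∈ s, x ∈ pattern) :
    (s.map (fun p => (bIds pattern).getD p 0)).take k
        = ((s.map (fun p => (bIds pattern).getD p 0)).take k).reverse
      ↔ s.take k = (s.take k).reverse := by
  set f : String → Int := fun p => (bIds pattern).getD p 0 with hf
  have h1 : (s.map f).take k = (s.take k).map f := List.map_take.symm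
  have h2 : ((s.map f).take k).reverse = ((s.take k).reverse).map f := by
    rw [h1, List.map_reverse]
  rw [h1] at h2
  rw [h1, h2]
  constructor
  · intro h
    exact map_inj_on f (· ∈ pattern) (fun a b ha hb => ids_injOn pattern a b ha hb)
      _ _ (fun x hx => hsub x (List.mem_of_mem_take hx))
      (fun x hx => hsub x (List.mem_of_mem_take (List.mem_reverse.mp hx))) h
  · intro h
    rw [← h]

theorem recBest_transfer (pattern : List String) (s : List String)
    (hsub : ∀ x ∈ s, x ∈ pattern) :
    ∀ j, recBest (s.map (fun p => (bIds pattern).getD p 0)) j = recBest s j := by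
  intro j
  induction j with
  | zero => rfl
  | succ j ih =>
    simp only [recBest]
    rw [ih]
    have ht := pal_transfer pattern s (j + 1) hsub
    by_cases he : (j + 1) % 2 = 0
    · by_cases hp : s.take (j + 1) = (s.take (j + 1)).reverse
      · rw [if_pos ⟨he, ht.mpr hp⟩, if_pos ⟨he, hp⟩]
      · rw [if_neg (fun hc => hp (ht.mp hc.2)), if_neg (fun hc => hp hc.2)]
    · rw [if_neg (fun hc => he hc.1), if_neg (fun hc => he hc.1)]

-- ---- B-side characterisation ----
-- the while loop reaches c iff every centred pair from r on matches
theorem bWhile_iff_aux (seq : List String) (c : Nat) :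
    ∀ (n r : Nat), c - r ≤ n → r ≤ c →
    (bWhile seq (c : Int) (r : Int) = (c : Int) ↔
      ∀ i : Nat, r ≤ i → i < c →
        PySem.List.pyGetD seq ((c : Int) - 1 - (i : Int)) ""
          = PySem.List.pyGetD seq ((c : Int) + (i : Int)) "") := by
  intro n
  induction n with
  | zero =>
    intro r h1 h2
    have hrc : r = c := by omega
    subst hrc
    rw [bWhile, dif_neg (by rintro ⟨hlt, -⟩; omega)]
    constructor
    · intro _ i hi1 hi2; omega
    · intro _; rfl
  | succ m ih =>
    intro r h1 h2
    rcases Nat.lt_or_ge r c with hrc | hrc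
    · rw [bWhile]
      by_cases hpair : PySem.List.pyGetD seq ((c : Int) - 1 - (r : Int)) ""
          = PySem.List.pyGetD seq ((c : Int) + (r : Int)) ""
      · rw [dif_pos ⟨by exact_mod_cast hrc, hpair⟩]
        have hcast : (r : Int) + 1 = ((r + 1 : Nat) : Int) := by push_cast; ring
        rw [hcast, ih (r + 1) (by omega) (by omega)]
        constructor
        · intro h i hi1 hi2
          rcases Nat.eq_or_lt_of_le hi1 with he | hl
          · subst he; exact hpair
          · exact h i hl hi2
        · intro h i hi1 hi2; exact h i (by omega) hi2
      · rw [dif_neg (by rintro ⟨-, hp⟩; exact hpair hp)]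
        constructor
        · intro h
          exfalso
          have : r = c := by exact_mod_cast h
          omega
        · intro h; exfalso; exact hpair (h r le_rfl hrc)
    · have hrc' : r = c := by omega
      subst hrc'
      rw [bWhile, dif_neg (by rintro ⟨hlt, -⟩; omega)]
      constructor
      · intro _ i hi1 hi2; omega
      · intro _; rfl

-- mirrored half-pair check ⟺ whole-prefix palindrome, for even k
theorem pal_half (s : List String) (k : Nat) (hk : k ≤ s.length) (he : k % 2 = 0) :
    (∀ i : Nat, i < k / 2 → s.getD i "" = s.getD (k - 1 - i) "")
      ↔ s.take k = (s.take k).reverse := by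
  have hlen : (s.take k).length = k := by simp [List.length_take, Nat.min_eq_left hk]
  have htake : ∀ i : Nat, i < k → (s.take k).getD i "" = s.getD i "" := by
    intro i hi
    rw [List.getD_eq_getElem (s.take k) "" (by omega : i < (s.take k).length),
        List.getD_eq_getElem s "" (by omega : i < s.length), List.getElem_take]
  constructor
  · intro hpair
    have hfull : ∀ i : Nat, i < k → s.getD i "" = s.getD (k - 1 - i) "" := by
      intro i hi
      by_cases hh : i < k / 2
      · exact hpair i hh
      · have hj : k - 1 - i < k / 2 := by omega
        have h := (hpair (k - 1 - i) hj).symm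
        rwa [show k - 1 - (k - 1 - i) = i from by omega] at h
    apply List.ext_getElem (by simp [hlen])
    intro i h1 h2
    have hik : i < k := by omega
    rw [List.getElem_reverse]
    calc (s.take k)[i]'h1
        = (s.take k).getD i "" := (List.getD_eq_getElem _ "" h1).symm
      _ = s.getD i "" := htake i hik
      _ = s.getD (k - 1 - i) "" := hfull i hik
      _ = (s.take k).getD (k - 1 - i) "" := (htake _ (by omega)).symm
      _ = (s.take k)[(s.take k).length - 1 - i]'(by omega) := by
            rw [List.getD_eq_getElem (s.take k) "" (by omega : k - 1 - i < (s.take k).length)]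
            congr 1
            omega
  · intro hp i hi
    have hik : i < k := by omega
    have h1 : i < (s.take k).length := by omega
    calc s.getD i "" = (s.take k).getD i "" := (htake i hik).symm
      _ = (s.take k)[i]'h1 := List.getD_eq_getElem _ "" h1
      _ = ((s.take k).reverse)[i]'(by simpa using h1) := List.getElem_of_eq hp h1
      _ = (s.take k)[(s.take k).length - 1 - i]'(by omega) := List.getElem_reverse _
      _ = (s.take k).getD (k - 1 - i) "" := by
            rw [List.getD_eq_getElem (s.take k) "" (by omega : k - 1 - i < (s.take k).length)]
            congr 1
            omega
      _ = s.getD (k - 1 - i) "" := htake _ (by omega)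

-- bWhile reaching c ⟺ the prefix of length 2c is a palindrome
theorem bWhile_pal (s : List String) (c : Nat) (hc : 2 * c ≤ s.length) :
    (bWhile s (c : Int) 0 = (c : Int)) ↔ s.take (2 * c) = (s.take (2 * c)).reverse := by
  have h0 : ((0 : Nat) : Int) = (0 : Int) := rfl
  rw [← h0, bWhile_iff_aux s c c 0 (by omega) (by omega)]
  have hidx : ∀ i : Nat, i < c →
      ((PySem.List.pyGetD s ((c : Int) - 1 - (i : Int)) ""
          = PySem.List.pyGetD s ((c : Int) + (i : Int)) "")
        ↔ (s.getD (c - 1 - i) "" = s.getD (c + i) "")) := by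
    intro i hi
    rw [show (c : Int) - 1 - (i : Int) = ((c - 1 - i : Nat) : Int) from by omega,
        show (c : Int) + (i : Int) = ((c + i : Nat) : Int) from by push_cast; ring,
        PySem.List.pyGetD_natCast, PySem.List.pyGetD_natCast]
  rw [← pal_half s (2 * c) hc (by omega)]
  constructor
  · intro h j hj
    have hjj : c - 1 - j < c := by
      rcases Nat.eq_zero_or_pos c with h0 | h0
      · omega
      · omega
    have h2 := (hidx (c - 1 - j) hjj).mp (h (c - 1 - j) (by omega) hjj)
    have hcj : 2 * c / 2 = c := by omega
    rw [hcj] at hj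
    rwa [show c - 1 - (c - 1 - j) = j from by omega,
         show c + (c - 1 - j) = 2 * c - 1 - j from by omega] at h2
  · intro h i hi0 hic
    rw [hidx i hic]
    have hcj : 2 * c / 2 = c := by omega
    have h2 := h (c - 1 - i) (by rw [hcj]; omega)
    rwa [show 2 * c - 1 - (c - 1 - i) = c + i from by omega] at h2

-- B's ascending centre fold computes recBest
theorem bEdge_fold (s : List String) : ∀ cm : Nat, 2 * cm ≤ s.length →
    (PySem.List.pyRange 1 ((cm : Int) + 1) 1).foldl
      (fun best c => if bWhile s c 0 = c then 2 * c else best) 0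
    = ((recBest s (2 * cm + 1) : Nat) : Int) := by
  intro cm
  induction cm with
  | zero =>
    intro _
    rw [PySem.List.pyRange_one_eq_nil (by norm_num)]
    have h1 : recBest s (2 * 0 + 1) = 0 := by
      show recBest s (0 + 1) = 0
      simp only [recBest]
      rw [if_neg (by rintro ⟨h2, -⟩; omega)]
    rw [h1]
    rfl
  | succ cm ih =>
    intro h
    have hstep : ((cm + 1 : Nat) : Int) + 1 = ((cm : Int) + 1) + 1 := by push_cast; ring
    rw [hstep, PySem.List.pyRange_one_succ_right (by omega : (1 : Int) ≤ (cm : Int) + 1),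
        List.foldl_append]
    rw [ih (by omega)]
    simp only [List.foldl_cons, List.foldl_nil]
    have hc1 : (cm : Int) + 1 = ((cm + 1 : Nat) : Int) := by push_cast; ring
    rw [hc1]
    have hpal := bWhile_pal s (cm + 1) (by omega)
    rw [show 2 * (cm + 1) = 2 * cm + 2 from by ring] at hpal
    have hr : recBest s (2 * (cm + 1) + 1)
        = if (2 * cm + 2) % 2 = 0 ∧ s.take (2 * cm + 2) = (s.take (2 * cm + 2)).reverse
          then 2 * cm + 2 else recBest s (2 * cm + 1) := by
      rw [show 2 * (cm + 1) + 1 = (2 * cm + 2) + 1 from by ring, recBest_succ,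
          if_neg (by rintro ⟨h2, -⟩; omega)]
      exact recBest_succ s (2 * cm + 1)
    rw [hr]
    by_cases hp : s.take (2 * cm + 2) = (s.take (2 * cm + 2)).reverse
    · rw [if_pos (hpal.mpr hp), if_pos ⟨by omega, hp⟩]
      push_cast; ring
    · rw [if_neg (fun hc => hp (hpal.mp hc)), if_neg (by rintro ⟨-, h2⟩; exact hp h2)]

theorem bEdge_eq (s : List String) : bEdge s = ((recBest s s.length : Nat) : Int) := by
  unfold bEdge
  have hfd : PySem.Int.floordiv (s.length : Int) 2 = ((s.length / 2 : Nat) : Int) := by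
    exact_mod_cast PySem.Int.floordiv_natCast s.length 2
  rw [hfd, bEdge_fold s (s.length / 2) (by omega)]
  congr 1
  rcases Nat.even_or_odd s.length with he | ho
  · obtain ⟨c, hc⟩ := he
    rw [show 2 * (s.length / 2) + 1 = s.length + 1 from by omega]
    simp only [recBest]
    rw [if_neg (by rintro ⟨h2, -⟩; omega)]
  · obtain ⟨c, hc⟩ := ho
    rw [show 2 * (s.length / 2) + 1 = s.length from by omega]

-- ===== VERDICT (by name: the statement is the Claim_ definition above) =====
theorem get_contiguous_symmetry_spec : Claim_equal_get_contiguous_symmetry := by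
  intro pattern _
  unfold Spec_get_contiguous_symmetry
  simp only [get_contiguous_symmetry, get_contiguous_symmetry_alt, mask_eq_map]
  set f : String → Int := fun p => (bIds pattern).getD p 0 with hf
  set mask : List Int := pattern.map f with hmask
  have hlen : mask.length = pattern.length := by rw [hmask]; exact List.length_map ..
  have hrb : recBest mask pattern.length = recBest pattern pattern.length := by
    rw [hmask, hf]; exact recBest_transfer pattern pattern (fun x hx => hx) _
  have hmrev : mask.reverse = pattern.reverse.map f := by rw [hmask, List.map_reverse]
  have hrbrev : recBest mask.reverse pattern.length = recBest pattern.reverse pattern.length := by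
    rw [hmrev, hf]
    exact recBest_transfer pattern pattern.reverse (fun x hx => List.mem_reverse.mp hx) _
  rw [bEdge_eq pattern, checkLoop_eq mask mask.length, findLoop_eq mask mask.length le_rfl, hlen, hrb]
  by_cases h0 : recBest pattern pattern.length = 0
  · rw [if_pos h0, h0]
    simp only [Option.isSome_none, Bool.false_eq_true, if_false, Nat.cast_zero]
    rw [findLoop_eq mask.reverse mask.reverse.length le_rfl, bEdge_eq pattern.reverse]
    have hlr : mask.reverse.length = pattern.length := by simp [hlen]
    rw [hlr, hrbrev]
    have hlr2 : pattern.reverse.length = pattern.length := List.length_reverse ..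
    rw [hlr2]
    set kr : Nat := recBest pattern.reverse pattern.length with hkr
    simp only [reduceIte]
    rw [PySem.List.slice_to_natCast, hmrev]
    by_cases h1 : kr = 0
    · rw [if_pos h1, h1]
      simp
    · rw [if_neg h1]
      simp [List.map_take]
  · rw [if_neg h0]
    have hcast : ((recBest pattern pattern.length : Nat) : Int) ≠ 0 := by exact_mod_cast h0
    simp only [Option.isSome_some, if_true, if_neg hcast]
    rw [findLoop_eq mask mask.length le_rfl, hlen, hrb, if_neg h0,
        PySem.List.slice_to_natCast]
    simp [hmask, List.map_take]
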